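-- pv_equiv track=rewrite | github.com/SaiVigneshchalnati/RoadSafe | Scripts/main.py | detect_lane_change
-- ===== SOURCE A (Python) =====
-- def detect_lane_change(positions, lanes):
--     # Simple lane change detection by checking if vehicle crossed lane boundaries
--     crossed_lanes = False
--     for i in range(1, len(positions)):
--         for lane in lanes:
--             lane_y = lane[0][1]
--             if (positions[i-1] < lane_y and positions[i] > lane_y) or \
--                (positions[i-1] > lane_y and positions[i] < lane_y):
--                 crossed_lanes = True
--     return crossed_lanes
-- ===== SOURCE B (Python) =====
-- def _bisect_right(ys, x):
--     # index of the first element of sorted ys strictly greater than x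
--     lo, hi = 0, len(ys)
--     while lo < hi:
--         mid = (lo + hi) // 2
--         if ys[mid] <= x:
--             lo = mid + 1
--         else:
--             hi = mid
--     return lo
--
--
-- def detect_lane_change(positions, lanes):
--     # A crossing between consecutive positions a,b means some boundary y lies
--     # strictly between them; sort the boundaries once and binary-search each pair.
--     ys = sorted(lane[0][1] for lane in lanes)
--     for a, b in zip(positions, positions[1:]):
--         lo, hi = (a, b) if a < b else (b, a)
--         j = _bisect_right(ys, lo)
--         if j < len(ys) and ys[j] < hi:
--             return True
--     return False
-- ===== Notes on version B (the rewrite author's own statement) =====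
-- stated objective: faster
-- what changed: B sorts the lane boundary y-values once and, for each consecutive position pair, binary-searches the sorted boundaries for a value strictly between the pair (returning early on the first hit), replacing A's rescan of all lanes for every pair.
-- outside the precondition, e.g. on detect_lane_change([], [[]]): A returns False, B raises IndexError
import Mathlib
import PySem

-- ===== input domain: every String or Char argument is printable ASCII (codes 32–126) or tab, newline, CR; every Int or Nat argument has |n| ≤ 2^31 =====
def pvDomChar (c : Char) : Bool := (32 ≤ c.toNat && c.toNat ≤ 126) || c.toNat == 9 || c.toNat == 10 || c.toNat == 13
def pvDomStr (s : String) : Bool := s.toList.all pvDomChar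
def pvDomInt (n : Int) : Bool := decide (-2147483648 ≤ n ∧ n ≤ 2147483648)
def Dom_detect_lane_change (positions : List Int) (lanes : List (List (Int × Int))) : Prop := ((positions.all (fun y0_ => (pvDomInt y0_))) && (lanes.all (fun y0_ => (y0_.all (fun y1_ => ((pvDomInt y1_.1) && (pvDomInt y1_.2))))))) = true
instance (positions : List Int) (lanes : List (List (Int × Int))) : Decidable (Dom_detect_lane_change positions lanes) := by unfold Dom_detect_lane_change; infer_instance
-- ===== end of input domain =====

-- B sorts the lane boundary y-values once and binary-searches each consecutive
-- position interval for a strictly-between boundary (with early exit), instead of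
-- A's full scan of all lanes for every consecutive pair.

-- ===== PORT A =====
def detect_lane_change (positions : List Int) (lanes : List (List (Int × Int))) : Bool :=
  (PySem.List.pyRange 1 positions.length 1).foldl
    (fun crossed i =>
      lanes.foldl
        (fun crossed lane =>
          let lane_y := (PySem.List.pyGetD lane 0 (0, 0)).2
          if (decide (PySem.List.pyGetD positions (i - 1) 0 < lane_y) &&
              decide (PySem.List.pyGetD positions i 0 > lane_y)) ||
             (decide (PySem.List.pyGetD positions (i - 1) 0 > lane_y) &&
              decide (PySem.List.pyGetD positions i 0 < lane_y)) then true else crossed)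
        crossed)
    false

-- ===== PORT B =====
-- Source B's hand-written _bisect_right is exactly Python's bisect_right loop;
-- ported as the prelude's primitive PySem.List.bisectRight.
def pvAltGo (ys : List Int) : List (Int × Int) → Bool
  | [] => false
  | (a, b) :: rest =>
    let lo := if a < b then a else b
    let hi := if a < b then b else a
    let j := PySem.List.bisectRight ys lo
    if decide (j < ys.length) && decide (ys.getD j 0 < hi) then true
    else pvAltGo ys rest

def detect_lane_change_alt (positions : List Int) (lanes : List (List (Int × Int))) : Bool :=
  let ys := PySem.List.sorted (lanes.map (fun lane => (PySem.List.pyGetD lane 0 (0, 0)).2)) (fun y => y)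
  pvAltGo ys (positions.zip positions.tail)

-- ===== PRECONDITION & SPEC =====
-- Pre_ excludes inputs containing an empty lane: there A raises IndexError on lane[0]
-- whenever there are at least two positions, and B's boundary precomputation raises
-- IndexError on every such input.
def Pre_detect_lane_change (positions : List Int) (lanes : List (List (Int × Int))) : Prop :=
  ∀ lane ∈ lanes, lane ≠ []
instance (positions : List Int) (lanes : List (List (Int × Int))) : Decidable (Pre_detect_lane_change positions lanes) := by unfold Pre_detect_lane_change; infer_instance

def pvWitness_detect_lane_change : List Int × (List (List (Int × Int))) :=
  ([0, 3, 1], [[(0, 2)], [(5, 7), (1, 1)]])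

def Spec_detect_lane_change (positions : List Int) (lanes : List (List (Int × Int))) (out : Bool) : Prop := out = detect_lane_change_alt positions lanes
instance (positions : List Int) (lanes : List (List (Int × Int))) (out : Bool) : Decidable (Spec_detect_lane_change positions lanes out) := by unfold Spec_detect_lane_change; infer_instance

-- ===== CLAIM (what is proved, stated in full; the proofs are below) =====
def Claim_equal_detect_lane_change : Prop := ∀ (positions : List Int) (lanes : List (List (Int × Int))), Dom_detect_lane_change positions lanes → Pre_detect_lane_change positions lanes → Spec_detect_lane_change positions lanes (detect_lane_change positions lanes)

-- ===== LEMMAS AND PROOFS =====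

-- an or-accumulating fold is List.any
theorem pv_foldl_or_any {α : Type} (l : List α) (g : α → Bool) (b : Bool) :
    l.foldl (fun c x => c || g x) b = (b || l.any g) := by
  induction l generalizing b with
  | nil => simp
  | cons x t ih => simp [List.foldl_cons, ih, Bool.or_assoc]

-- pvAltGo is an early-exit any
theorem pvAltGo_eq_any (ys : List Int) (l : List (Int × Int)) :
    pvAltGo ys l = l.any (fun p =>
      decide (PySem.List.bisectRight ys (if p.1 < p.2 then p.1 else p.2) < ys.length) &&
      decide (ys.getD (PySem.List.bisectRight ys (if p.1 < p.2 then p.1 else p.2)) 0 <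
              (if p.1 < p.2 then p.2 else p.1))) := by
  induction l with
  | nil => rfl
  | cons p t ih =>
    obtain ⟨a, b⟩ := p
    rw [List.any_cons, ← ih]
    show (if (decide (PySem.List.bisectRight ys (if a < b then a else b) < ys.length) &&
        decide (ys.getD (PySem.List.bisectRight ys (if a < b then a else b)) 0 <
                (if a < b then b else a))) = true then true else pvAltGo ys t) = _
    cases hc : (decide (PySem.List.bisectRight ys (if a < b then a else b) < ys.length) &&
        decide (ys.getD (PySem.List.bisectRight ys (if a < b then a else b)) 0 <
                (if a < b then b else a))) <;> simp

-- an indexed scan of consecutive pairs is a scan of zip(positions, positions[1:])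
theorem pv_index_any_eq_zip_any (ps : List Int) (q : Int → Int → Bool) :
    (PySem.List.pyRange 1 ps.length 1).any
        (fun i => q (PySem.List.pyGetD ps (i - 1) 0) (PySem.List.pyGetD ps i 0)) =
      (ps.zip ps.tail).any (fun p => q p.1 p.2) := by
  rw [Bool.eq_iff_iff]
  simp only [List.any_eq_true, PySem.List.mem_pyRange_one]
  constructor
  · rintro ⟨i, ⟨h1, h2⟩, hq⟩
    have hzl : (ps.zip ps.tail).length = ps.length - 1 := by
      simp [List.length_zip, List.length_tail]
    have hk : (i - 1).toNat < (ps.zip ps.tail).length := by omega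
    refine ⟨(ps.zip ps.tail)[(i-1).toNat], List.getElem_mem hk, ?_⟩
    have hk2 : (i - 1).toNat < ps.tail.length := by simp [List.length_tail]; omega
    rw [List.getElem_zip, List.getElem_tail]
    rw [PySem.List.pyGetD_eq_getElem ps (i := i - 1) 0 (by omega) (by omega),
        PySem.List.pyGetD_eq_getElem ps (i := i) 0 (by omega) (by omega)] at hq
    convert hq using 3
    all_goals omega
  · rintro ⟨p, hp, hq⟩
    obtain ⟨k, hk, hpk⟩ := List.mem_iff_getElem.mp hp
    have hk' : k + 1 < ps.length := by
      simp [List.length_zip, List.length_tail] at hk; omega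
    refine ⟨(k : Int) + 1, ⟨by omega, by omega⟩, ?_⟩
    rw [List.getElem_zip, List.getElem_tail] at hpk
    rw [PySem.List.pyGetD_eq_getElem ps (i := (k : Int) + 1 - 1) 0 (by omega) (by omega),
        PySem.List.pyGetD_eq_getElem ps (i := (k : Int) + 1) 0 (by omega) (by omega)]
    rw [← hpk] at hq
    convert hq using 3
    all_goals omega

-- the crux: on a sorted list, the binary-search check decides
-- "some element lies strictly between a and b"
theorem pv_bisect_check (ys : List Int) (hs : ys.Pairwise (· ≤ ·)) (a b : Int) :
    (decide (PySem.List.bisectRight ys (if a < b then a else b) < ys.length) &&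
     decide (ys.getD (PySem.List.bisectRight ys (if a < b then a else b)) 0 <
             (if a < b then b else a))) =
    ys.any (fun y => (decide (a < y) && decide (b > y)) || (decide (a > y) && decide (b < y))) := by
  set lo := if a < b then a else b with hlo
  set hi := if a < b then b else a with hhi
  have hcond : ∀ y : Int,
      ((decide (a < y) && decide (b > y)) || (decide (a > y) && decide (b < y))) =
      (decide (lo < y) && decide (y < hi)) := by
    intro y
    rw [Bool.eq_iff_iff]
    by_cases hab : a < b <;> simp [hlo, hhi, hab] <;> omega
  rw [List.any_congr rfl hcond]
  obtain ⟨hle, hbelow, habove⟩ := PySem.List.bisectRight_spec ys lo hs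
  set j := PySem.List.bisectRight ys lo with hj
  rw [Bool.eq_iff_iff]
  simp only [Bool.and_eq_true, decide_eq_true_eq, List.any_eq_true]
  constructor
  · rintro ⟨h1, h2⟩
    rw [List.getD_eq_getElem ys 0 h1] at h2
    exact ⟨ys[j], List.getElem_mem h1, by simp [habove j h1 le_rfl, h2]⟩
  · rintro ⟨y, hy, hlo', hhi'⟩
    obtain ⟨k, hk, hyk⟩ := List.mem_iff_getElem.mp hy
    have hjk : j ≤ k := by
      by_contra hlt
      have := hbelow k hk (by omega)
      rw [hyk] at this; omega
    have hjlen : j < ys.length := lt_of_le_of_lt hjk hk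
    refine ⟨hjlen, ?_⟩
    rw [List.getD_eq_getElem ys 0 hjlen]
    have hmono : ys[j] ≤ ys[k] := by
      rcases eq_or_lt_of_le hjk with h | h
      · subst h; rfl
      · exact List.pairwise_iff_getElem.mp hs j k hjlen hk h
    rw [hyk] at hmono
    omega

theorem detect_lane_change_eq (positions : List Int) (lanes : List (List (Int × Int))) :
    detect_lane_change positions lanes = detect_lane_change_alt positions lanes := by
  unfold detect_lane_change detect_lane_change_alt
  set f : List (Int × Int) → Int := fun lane => (PySem.List.pyGetD lane 0 (0, 0)).2 with hf
  set ys := PySem.List.sorted (lanes.map f) (fun y => y) with hys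
  have hsorted : ys.Pairwise (· ≤ ·) := PySem.List.sorted_pairwise (lanes.map f) (fun y => y)
  have hperm : ys.Perm (lanes.map f) := PySem.List.sorted_perm (lanes.map f) (fun y => y) false
  -- inner lanes loop is an any over the boundary values
  have hinner : ∀ (i : Int) (c : Bool),
      lanes.foldl
        (fun crossed lane =>
          if (decide (PySem.List.pyGetD positions (i - 1) 0 < f lane) &&
              decide (PySem.List.pyGetD positions i 0 > f lane)) ||
             (decide (PySem.List.pyGetD positions (i - 1) 0 > f lane) &&
              decide (PySem.List.pyGetD positions i 0 < f lane)) then true else crossed) c =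
      (c || ys.any (fun y =>
          (decide (PySem.List.pyGetD positions (i - 1) 0 < y) &&
           decide (PySem.List.pyGetD positions i 0 > y)) ||
          (decide (PySem.List.pyGetD positions (i - 1) 0 > y) &&
           decide (PySem.List.pyGetD positions i 0 < y)))) := by
    intro i c
    rw [PySem.List.foldl_if_true_eq, hperm.any_eq, List.any_map]
    rfl
  calc (PySem.List.pyRange 1 positions.length 1).foldl
        (fun crossed i =>
          lanes.foldl
            (fun crossed lane =>
              if (decide (PySem.List.pyGetD positions (i - 1) 0 < f lane) &&
                  decide (PySem.List.pyGetD positions i 0 > f lane)) ||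
                 (decide (PySem.List.pyGetD positions (i - 1) 0 > f lane) &&
                  decide (PySem.List.pyGetD positions i 0 < f lane)) then true else crossed)
            crossed) false
      = (PySem.List.pyRange 1 positions.length 1).foldl
          (fun crossed i => crossed || ys.any (fun y =>
            (decide (PySem.List.pyGetD positions (i - 1) 0 < y) &&
             decide (PySem.List.pyGetD positions i 0 > y)) ||
            (decide (PySem.List.pyGetD positions (i - 1) 0 > y) &&
             decide (PySem.List.pyGetD positions i 0 < y)))) false := by
        exact PySem.List.foldl_congr_mem _ _ _ _ (fun c i _ => hinner i c)
    _ = (PySem.List.pyRange 1 positions.length 1).any (fun i => ys.any (fun y =>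
            (decide (PySem.List.pyGetD positions (i - 1) 0 < y) &&
             decide (PySem.List.pyGetD positions i 0 > y)) ||
            (decide (PySem.List.pyGetD positions (i - 1) 0 > y) &&
             decide (PySem.List.pyGetD positions i 0 < y)))) := by
        rw [pv_foldl_or_any]; simp
    _ = (positions.zip positions.tail).any (fun p => ys.any (fun y =>
            (decide (p.1 < y) && decide (p.2 > y)) || (decide (p.1 > y) && decide (p.2 < y)))) := by
        exact pv_index_any_eq_zip_any positions
          (fun u v => ys.any (fun y => (decide (u < y) && decide (v > y)) || (decide (u > y) && decide (v < y))))
    _ = pvAltGo ys (positions.zip positions.tail) := by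
        rw [pvAltGo_eq_any]
        exact List.any_congr rfl (fun p => (pv_bisect_check ys hsorted p.1 p.2).symm)

-- ===== VERDICT (by name: the statement is the Claim_ definition above) =====
theorem detect_lane_change_spec : Claim_equal_detect_lane_change := by
  intro positions lanes _ _
  unfold Spec_detect_lane_change
  exact detect_lane_change_eq positions lanes
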